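-- pv_equiv track=rewrite | github.com/shervinkhalafi/graph_gen | tmgg/src/tmgg/training/lightning_modules/diffusion_module.py | _block_name
-- ===== SOURCE A (Python) =====
-- def _block_name(param_name: str) -> str:
--     """Group a parameter name into a block-level bucket.
--
--     Examples
--     --------
--     ``transformer.tf_layers.5.self_attn.weight`` → ``tf_layers_5``
--     ``transformer.mlp_in_X.0.weight`` → ``mlp_in_X``
--     ``transformer.mlp_out_E.0.bias`` → ``mlp_out_E``
--
--     Anything that doesn't match a known prefix lands in ``other``.
--     """
--     parts = param_name.split(".")
--     for idx, part in enumerate(parts):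
--         if part == "tf_layers" and idx + 1 < len(parts):
--             return f"tf_layers_{parts[idx + 1]}"
--     for part in parts:
--         if part.startswith("mlp_in_") or part.startswith("mlp_out_"):
--             return part
--     return "other"
-- ===== SOURCE B (Python) =====
-- def _block_name(param_name: str) -> str:
--     # Single streaming pass over the dot-separated tokens (find/slice), no parts
--     # list and no second loop: tf_layers returns immediately, the first mlp_* hit
--     # is remembered and used only if no tf_layers token (with a successor) shows up.
--     s = param_name
--     mlp = None
--     while True:
--         dot = s.find(".")
--         tok = s if dot == -1 else s[:dot]
--         if mlp is None and (tok.startswith("mlp_in_") or tok.startswith("mlp_out_")):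
--             mlp = tok
--         if dot == -1:
--             return mlp if mlp is not None else "other"
--         if tok == "tf_layers":
--             rest = s[dot + 1:]
--             nd = rest.find(".")
--             return "tf_layers_" + (rest if nd == -1 else rest[:nd])
--         s = s[dot + 1:]
-- ===== Notes on version B (the rewrite author's own statement) =====
-- stated objective: alternative
-- what changed: B replaces A's split-into-a-token-list plus two sequential loops (tf_layers scan with index lookahead, then mlp_* scan) by a single streaming find/slice pass over the raw string that returns immediately on a tf_layers token with a successor and remembers the first mlp_* token for the fallback.
import Mathlib
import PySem

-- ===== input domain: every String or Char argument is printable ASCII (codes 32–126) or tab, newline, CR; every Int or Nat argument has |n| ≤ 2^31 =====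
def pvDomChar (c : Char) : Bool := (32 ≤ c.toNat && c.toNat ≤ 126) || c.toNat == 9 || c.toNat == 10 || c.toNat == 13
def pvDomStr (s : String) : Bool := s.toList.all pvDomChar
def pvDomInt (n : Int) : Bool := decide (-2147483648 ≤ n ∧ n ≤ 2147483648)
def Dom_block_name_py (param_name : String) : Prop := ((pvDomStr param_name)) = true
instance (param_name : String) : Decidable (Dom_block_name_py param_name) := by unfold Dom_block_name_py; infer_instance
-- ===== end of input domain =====

-- B replaces A's split-into-a-list plus two sequential loops by one streaming find/slice
-- pass over the raw string (objective: alternative; same linear cost).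

-- ===== PORT A =====
-- first loop: 'for idx, part in enumerate(parts): if part == "tf_layers" and idx+1 < len(parts): return ...'
def blockATf (parts : List (List Char)) : Nat → List (List Char) → Option (List Char)
  | _, [] => none
  | idx, part :: rest =>
    if part = "tf_layers".toList ∧ idx + 1 < parts.length then
      some ("tf_layers_".toList ++ PySem.List.pyGetD parts ((idx : Int) + 1) [])
    else blockATf parts (idx + 1) rest

-- second loop: 'for part in parts: if part.startswith("mlp_in_") or part.startswith("mlp_out_"): return part'
def blockAMlp : List (List Char) → Option (List Char)
  | [] => none
  | part :: rest =>
    if PySem.Chars.startswith part "mlp_in_".toList || PySem.Chars.startswith part "mlp_out_".toList then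
      some part
    else blockAMlp rest

def block_name_py (param_name : String) : String :=
  let parts := PySem.Chars.splitOn param_name.toList ['.']
  match blockATf parts 0 parts with
  | some r => String.ofList r
  | none =>
    match blockAMlp parts with
    | some r => String.ofList r
    | none => "other"

-- ===== PORT B =====
-- the 'while True' loop of Source B: state = (current suffix s, remembered first mlp_* token)
def blockBScan (s : List Char) (mlp : Option (List Char)) : List Char :=
  let dot := PySem.Chars.find s ['.']
  let tok := if dot = -1 then s else PySem.Chars.slice s none (some dot)
  let mlp' := if mlp = none ∧ (PySem.Chars.startswith tok "mlp_in_".toList || PySem.Chars.startswith tok "mlp_out_".toList) then some tok else mlp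
  if h : dot = -1 then
    match mlp' with
    | some m => m
    | none => "other".toList
  else if tok = "tf_layers".toList then
    let rest := PySem.Chars.slice s (some (dot + 1)) none
    let nd := PySem.Chars.find rest ['.']
    "tf_layers_".toList ++ (if nd = -1 then rest else PySem.Chars.slice rest none (some nd))
  else
    blockBScan (PySem.Chars.slice s (some (dot + 1)) none) mlp'
termination_by s.length
decreasing_by
  have h0 : (0:Int) ≤ PySem.Chars.find s ['.'] := by
    have := PySem.Chars.neg_one_le_find s ['.']; omega
  have hne : s ≠ [] := by
    intro hnil
    have : ['.'] <:+: s := (PySem.Chars.find_nonneg_iff s ['.']).mp h0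
    subst hnil; simp at this
  have : PySem.Chars.slice s (some (PySem.Chars.find s ['.'] + 1)) none
      = List.drop (PySem.Chars.find s ['.'] + 1).toNat s := by
    simp [PySem.Chars.slice_eq_listSlice, PySem.List.slice_from _ (by omega : (0:Int) ≤ PySem.Chars.find s ['.'] + 1)]
  rw [this]
  have hlen : 0 < s.length := List.length_pos_iff.mpr hne
  have : 0 < (PySem.Chars.find s ['.'] + 1).toNat := by omega
  simp [List.length_drop]; omega

def block_name_py_alt (param_name : String) : String :=
  String.ofList (blockBScan param_name.toList none)

-- ===== PRECONDITION & SPEC =====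
def Spec_block_name_py (param_name : String) (out : String) : Prop := out = block_name_py_alt param_name
instance (param_name : String) (out : String) : Decidable (Spec_block_name_py param_name out) := by unfold Spec_block_name_py; infer_instance

-- ===== CLAIM (what is proved, stated in full; the proofs are below) =====
def Claim_equal_block_name_py : Prop := ∀ (param_name : String), Dom_block_name_py param_name → Spec_block_name_py param_name (block_name_py param_name)

-- ===== LEMMAS AND PROOFS =====

-- reference model of param_name.split(".")
def splitDot : List Char → List (List Char)
  | [] => [[]]
  | c :: r =>
    if c = '.' then [] :: splitDot r
    else
      match splitDot r with
      | [] => [[c]]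
      | t :: ts => (c :: t) :: ts

-- reference model of A's first loop: look at adjacent pairs
def tfScanD : List (List Char) → Option (List Char)
  | p :: q :: rest => if p = "tf_layers".toList then some ("tf_layers_".toList ++ q) else tfScanD (q :: rest)
  | _ => none

-- what blockBScan computes, phrased over the token list
def bSpec (parts : List (List Char)) (mlp : Option (List Char)) : List Char :=
  match tfScanD parts with
  | some r => r
  | none =>
    match mlp.or (blockAMlp parts) with
    | some m => m
    | none => "other".toList

theorem splitDot_ne_nil (l : List Char) : splitDot l ≠ [] := by
  induction l with
  | nil => simp [splitDot]
  | cons c r ih =>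
    simp only [splitDot]
    split
    · simp
    · split <;> simp

theorem splitOn_go_eq (l : List Char) : ∀ (fuel : Nat) (cur : List Char) (acc : List (List Char)),
    l.length ≤ fuel →
    PySem.Chars.splitOn.go ['.'] fuel l cur acc
      = acc.reverse ++ (match splitDot l with
        | [] => []
        | t :: ts => (cur.reverse ++ t) :: ts) := by
  induction l with
  | nil =>
    intro fuel cur acc _
    cases fuel <;> simp [PySem.Chars.splitOn.go, splitDot]
  | cons c r ih =>
    intro fuel cur acc hf
    cases fuel with
    | zero => simp at hf
    | succ f =>
      simp only [PySem.Chars.splitOn.go]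
      by_cases hc : c = '.'
      · subst hc
        have hpre : List.isPrefixOf ['.'] ('.' :: r) = true := by simp [List.isPrefixOf]
        rw [if_pos hpre]
        simp only [List.length_cons] at hf
        simp only [List.length_singleton, List.drop_succ_cons, List.drop_zero]
        rw [ih f [] (List.reverse cur :: acc) (by omega)]
        simp only [splitDot]
        rcases hsp : splitDot r with _ | ⟨t, ts⟩
        · exact absurd hsp (splitDot_ne_nil r)
        · simp
      · have hpre : List.isPrefixOf ['.'] (c :: r) = false := by
          simp [List.isPrefixOf]; exact fun h => absurd h.symm hc
        rw [if_neg (by simp [hpre])]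
        simp only [List.length_cons] at hf
        rw [ih f (c :: cur) acc (by omega)]
        simp only [splitDot, if_neg hc]
        rcases hsp : splitDot r with _ | ⟨t, ts⟩
        · exact absurd hsp (splitDot_ne_nil r)
        · simp

theorem splitOn_eq_splitDot (s : List Char) : PySem.Chars.splitOn s ['.'] = splitDot s := by
  unfold PySem.Chars.splitOn
  rw [splitOn_go_eq s (s.length + 1) [] [] (by omega)]
  rcases hsp : splitDot s with _ | ⟨t, ts⟩
  · exact absurd hsp (splitDot_ne_nil s)
  · simp

theorem prefix_dot_iff (l : List Char) (i : Nat) : (['.'] <+: l.drop i) ↔ l[i]? = some '.' := by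
  rw [← List.head?_drop]
  rcases h : l.drop i with _ | ⟨c, r⟩
  · simp
  · constructor
    · intro hp
      rcases hp with ⟨t, ht⟩
      cases ht
      simp
    · intro hh
      simp at hh
      subst hh
      exact ⟨r, rfl⟩

theorem splitDot_no_dot (l : List Char) (h : '.' ∉ l) : splitDot l = [l] := by
  induction l with
  | nil => rfl
  | cons c r ih =>
    simp at h
    have hc : ¬ c = '.' := fun hh => h.1 hh.symm
    simp only [splitDot, if_neg hc, ih h.2]

theorem splitDot_split (l : List Char) : ∀ (d : Nat), l[d]? = some '.' →
    (∀ i < d, l[i]? ≠ some '.') →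
    splitDot l = l.take d :: splitDot (l.drop (d + 1)) := by
  induction l with
  | nil => intro d h1 _; simp at h1
  | cons c r ih =>
    intro d h1 h2
    cases d with
    | zero =>
      simp at h1
      subst h1
      simp [splitDot]
    | succ d' =>
      have hc : ¬ c = '.' := by
        intro hh; exact h2 0 (by omega) (by simp [hh])
      simp only [splitDot, if_neg hc]
      rw [ih d' (by simpa using h1) (fun i hi => by
        have := h2 (i+1) (by omega); simpa using this)]
      simp

theorem aTf_eq_aux (parts : List (List Char)) : ∀ (l : List (List Char)) (i : Nat),
    parts.drop i = l → blockATf parts i l = tfScanD l := by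
  intro l
  induction l with
  | nil => intro i _; rfl
  | cons part rest ih =>
    intro i hd
    have hdrop1 : parts.drop (i + 1) = rest := by
      rw [← List.tail_drop, hd]
      rfl
    have hget : parts[i]? = some part := by
      rw [← List.head?_drop, hd]; rfl
    rcases rest with _ | ⟨q, r⟩
    · -- no successor: i + 1 ≥ parts.length
      have : ¬ (i + 1 < parts.length) := by
        intro hlt
        have := List.drop_eq_nil_iff.mp hdrop1
        omega
      simp only [blockATf, tfScanD]
      rw [if_neg (by tauto)]
    · have hlt : i + 1 < parts.length := by
        have : parts.drop (i+1) ≠ [] := by rw [hdrop1]; simp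
        have := List.drop_eq_nil_iff.not.mp this
        omega
      have hq : parts[i+1]? = some q := by
        rw [← List.head?_drop, hdrop1]; rfl
      have hpg : PySem.List.pyGetD parts ((i : Int) + 1) [] = q := by
        have : ((i : Int) + 1) = ((i + 1 : Nat) : Int) := by push_cast; ring
        rw [this, PySem.List.pyGetD_natCast]
        simp [hq]
      simp only [blockATf, tfScanD]
      by_cases hp : part = "tf_layers".toList
      · rw [if_pos ⟨hp, hlt⟩, if_pos hp, hpg]
      · rw [if_neg (by tauto), if_neg hp]
        exact ih (i+1) hdrop1

theorem bSpec_cons (p t : List Char) (ts : List (List Char)) (hp : ¬ p = "tf_layers".toList)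
    (mlp : Option (List Char)) :
    bSpec (p :: t :: ts) mlp
      = bSpec (t :: ts) (if mlp = none ∧ (PySem.Chars.startswith p "mlp_in_".toList || PySem.Chars.startswith p "mlp_out_".toList) then some p else mlp) := by
  have hA : blockAMlp (p :: t :: ts)
      = if (PySem.Chars.startswith p "mlp_in_".toList || PySem.Chars.startswith p "mlp_out_".toList) then some p else blockAMlp (t :: ts) := rfl
  have hT : tfScanD (p :: t :: ts) = tfScanD (t :: ts) := by
    simp only [tfScanD, if_neg hp]
  unfold bSpec
  rw [hT, hA]
  rcases htv : tfScanD (t :: ts) with _ | r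
  · by_cases hb : (PySem.Chars.startswith p "mlp_in_".toList || PySem.Chars.startswith p "mlp_out_".toList) = true
    · rcases mlp with _ | m
      · rw [if_pos hb, if_pos ⟨rfl, hb⟩]
        simp
      · rw [if_pos hb, if_neg (by simp)]
        simp
    · rw [if_neg hb, if_neg (fun hh => hb hh.2)]
  · simp

theorem bScan_eq : ∀ (n : Nat) (s : List Char), s.length ≤ n → ∀ (mlp : Option (List Char)),
    blockBScan s mlp = bSpec (splitDot s) mlp := by
  intro n
  induction n using Nat.strong_induction_on with
  | _ n ih =>
  intro s hs mlp
  rw [blockBScan]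
  by_cases h : PySem.Chars.find s ['.'] = -1
  · -- no dot: single token
    have hmem : '.' ∉ s := by
      have hni := (PySem.Chars.find_eq_neg_one_iff s ['.']).mp h
      intro hm
      exact hni ((List.singleton_infix_iff '.' s).mpr hm)
    rw [splitDot_no_dot s hmem]
    simp only [if_pos h, dif_pos h, bSpec, tfScanD, blockAMlp]
    cases mlp <;> simp
  · have h0 : (0:Int) ≤ PySem.Chars.find s ['.'] := by
      have := PySem.Chars.neg_one_le_find s ['.']; omega
    obtain ⟨hpre, hmin⟩ := PySem.Chars.find_spec (s := s) (sub := ['.']) h0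
    have h1 : s[(PySem.Chars.find s ['.']).toNat]? = some '.' :=
      (prefix_dot_iff s _).mp hpre
    have h2 : ∀ i < (PySem.Chars.find s ['.']).toNat, s[i]? ≠ some '.' :=
      fun i hi hgi => (hmin i hi) ((prefix_dot_iff s i).mpr hgi)
    rw [splitDot_split s (PySem.Chars.find s ['.']).toNat h1 h2]
    have htok : PySem.Chars.slice s none (some (PySem.Chars.find s ['.'])) = s.take (PySem.Chars.find s ['.']).toNat := by
      simp [PySem.Chars.slice_eq_listSlice, PySem.List.slice_to _ h0]
    have hrest : PySem.Chars.slice s (some (PySem.Chars.find s ['.'] + 1)) none = s.drop ((PySem.Chars.find s ['.']).toNat + 1) := by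
      rw [PySem.Chars.slice_eq_listSlice, PySem.List.slice_from _ (by omega : (0:Int) ≤ PySem.Chars.find s ['.'] + 1)]
      congr 1
      omega
    simp only [if_neg h, dif_neg h, htok, hrest]
    set d := (PySem.Chars.find s ['.']).toNat with hd
    set rest := s.drop (d + 1) with hrestd
    by_cases htf : s.take d = "tf_layers".toList
    · -- tf branch
      rw [if_pos htf]
      rcases hsp : splitDot rest with _ | ⟨t, ts⟩
      · exact absurd hsp (splitDot_ne_nil rest)
      simp only [bSpec, tfScanD, if_pos htf]
      congr 1
      -- t = if nd = -1 then rest else take nd rest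
      by_cases hnd : PySem.Chars.find rest ['.'] = -1
      · have hmem' : '.' ∉ rest := by
          have hni := (PySem.Chars.find_eq_neg_one_iff rest ['.']).mp hnd
          intro hm; exact hni ((List.singleton_infix_iff '.' rest).mpr hm)
        rw [splitDot_no_dot rest hmem'] at hsp
        rw [if_pos hnd]
        injection hsp with h1' _
      · have h0' : (0:Int) ≤ PySem.Chars.find rest ['.'] := by
          have := PySem.Chars.neg_one_le_find rest ['.']; omega
        obtain ⟨hpre', hmin'⟩ := PySem.Chars.find_spec (s := rest) (sub := ['.']) h0'
        rw [splitDot_split rest (PySem.Chars.find rest ['.']).toNat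
          ((prefix_dot_iff rest _).mp hpre')
          (fun i hi hgi => (hmin' i hi) ((prefix_dot_iff rest i).mpr hgi))] at hsp
        rw [if_neg hnd]
        injection hsp with h1' _
        rw [← h1']
        simp [PySem.Chars.slice_eq_listSlice, PySem.List.slice_to _ h0']
    · rw [if_neg htf]
      have hne : s ≠ [] := by
        intro hnil
        have : ['.'] <:+: s := (PySem.Chars.find_nonneg_iff s ['.']).mp h0
        subst hnil; simp at this
      have hslen : rest.length < s.length := by
        have : 0 < s.length := List.length_pos_iff.mpr hne
        simp [hrestd, List.length_drop]; omega
      rw [ih rest.length (by omega) rest le_rfl _]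
      rcases hsp : splitDot rest with _ | ⟨t, ts⟩
      · exact absurd hsp (splitDot_ne_nil rest)
      exact (bSpec_cons (s.take d) t ts htf mlp).symm

-- ===== VERDICT (by name: the statement is the Claim_ definition above) =====
theorem block_name_py_spec : Claim_equal_block_name_py := by
  intro p _
  unfold Spec_block_name_py block_name_py block_name_py_alt
  dsimp only
  rw [bScan_eq p.toList.length p.toList le_rfl none]
  rw [splitOn_eq_splitDot]
  rw [aTf_eq_aux (splitDot p.toList) (splitDot p.toList) 0 (by simp)]
  unfold bSpec
  cases tfScanD (splitDot p.toList) with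
  | some r => rfl
  | none =>
    simp only [Option.or]
    cases blockAMlp (splitDot p.toList) with
    | some m => rfl
    | none => rfl
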